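-- pv_equiv track=rewrite | github.com/shikgom2/boj | 10122.py | solve
-- ===== SOURCE A (Python) =====
-- def solve(v):
--     pref, suff = 0, sum(v)
--     result = 0
--     for i in v:
--         suff -= i
--         result += i * pref * suff
--         pref += i
--     return result
-- ===== SOURCE B (Python) =====
-- def solve(v):
--     p1 = sum(v)
--     p2 = sum(x * x for x in v)
--     p3 = sum(x ** 3 for x in v)
--     return (p1 ** 3 - 3 * p1 * p2 + 2 * p3) // 6
-- ===== Notes on version B (the rewrite author's own statement) =====
-- stated objective: alternative
-- what changed: Replaces the positional prefix/suffix accumulation with Newton's identity: the result is the third elementary symmetric polynomial, computed from the power sums p1,p2,p3 via (p1^3-3*p1*p2+2*p3)//6.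
import Mathlib
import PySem

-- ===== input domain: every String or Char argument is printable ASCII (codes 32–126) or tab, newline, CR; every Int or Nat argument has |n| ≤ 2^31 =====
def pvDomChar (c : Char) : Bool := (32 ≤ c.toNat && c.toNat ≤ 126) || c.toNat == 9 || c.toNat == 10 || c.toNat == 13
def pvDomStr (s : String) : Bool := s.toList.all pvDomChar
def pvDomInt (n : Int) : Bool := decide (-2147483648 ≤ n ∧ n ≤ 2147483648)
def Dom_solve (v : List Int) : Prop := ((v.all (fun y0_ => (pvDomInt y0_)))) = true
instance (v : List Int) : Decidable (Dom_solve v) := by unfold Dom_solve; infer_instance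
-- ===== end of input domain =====

-- ===== PORT A =====
-- literal port of A: fold over v carrying (pref, suff, result)
def solve (v : List Int) : Int :=
  (v.foldl (fun (st : Int × Int × Int) i =>
      let suff := st.2.1 - i
      let result := st.2.2 + i * st.1 * suff
      let pref := st.1 + i
      (pref, suff, result)) (0, v.sum, 0)).2.2

-- ===== PORT B =====
-- port of B: power sums p1, p2, p3, then Newton's closed form with Python // 6
def solve_alt (v : List Int) : Int :=
  let p1 := v.sum
  let p2 := (v.map (fun x => x * x)).sum
  let p3 := (v.map (fun x => x ^ 3)).sum
  PySem.Int.floordiv (p1 ^ 3 - 3 * p1 * p2 + 2 * p3) 6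

-- ===== PRECONDITION & SPEC =====
def Spec_solve (v : List Int) (out : Int) : Prop := out = solve_alt v
instance (v : List Int) (out : Int) : Decidable (Spec_solve v out) := by unfold Spec_solve; infer_instance

-- ===== CLAIM (what is proved, stated in full; the proofs are below) =====
def Claim_equal_solve : Prop := ∀ (v : List Int), Dom_solve v → Spec_solve v (solve v)

-- ===== LEMMAS AND PROOFS =====

-- e2, e3: second and third elementary symmetric sums
def e2 : List Int → Int
  | [] => 0
  | x :: t => x * t.sum + e2 t

def e3 : List Int → Int
  | [] => 0
  | x :: t => x * e2 t + e3 t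

theorem loopA_eq (l : List Int) : ∀ (p r : Int),
    (l.foldl (fun (st : Int × Int × Int) i =>
      let suff := st.2.1 - i
      let result := st.2.2 + i * st.1 * suff
      let pref := st.1 + i
      (pref, suff, result)) (p, l.sum, r)).2.2 = r + p * e2 l + e3 l := by
  induction l with
  | nil => intro p r; simp [e2, e3]
  | cons x t ih =>
    intro p r
    simp only [List.foldl_cons, List.sum_cons]
    rw [show (x : Int) + t.sum - x = t.sum by ring]
    rw [ih (p + x) (r + x * p * t.sum)]
    simp [e2, e3]; ring

theorem sq_sum (l : List Int) :
    l.sum ^ 2 = (l.map (fun x => x * x)).sum + 2 * e2 l := by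
  induction l with
  | nil => simp [e2]
  | cons x t ih => simp [e2, List.sum_cons]; nlinarith [ih]

theorem newton (l : List Int) :
    l.sum ^ 3 - 3 * l.sum * (l.map (fun x => x * x)).sum
      + 2 * (l.map (fun x => x ^ 3)).sum = 6 * e3 l := by
  induction l with
  | nil => simp [e3]
  | cons x t ih =>
    simp only [List.sum_cons, List.map_cons, e3]
    linear_combination ih + 3 * x * sq_sum t

-- ===== VERDICT (by name: the statement is the Claim_ definition above) =====
theorem solve_spec : Claim_equal_solve := by
  intro v _
  unfold Spec_solve solve solve_alt
  rw [loopA_eq v 0 0]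
  show (0 : Int) + 0 * e2 v + e3 v = PySem.Int.floordiv
    (v.sum ^ 3 - 3 * v.sum * (v.map (fun x => x * x)).sum
      + 2 * (v.map (fun x => x ^ 3)).sum) 6
  rw [newton v, PySem.Int.floordiv_eq_ediv_of_pos (by norm_num),
    Int.mul_ediv_cancel_left _ (by norm_num : (6 : Int) ≠ 0)]
  ring
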